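-- pv_equiv track=rewrite | github.com/TinMon11/python-algoritmos-estructuras | basicos/ejercicios_2.py | comprimir
-- ===== SOURCE A (Python) =====
-- def comprimir(cadena):
--
--     hash_map = {}
--     result = ""
--
--     for letra in cadena:
--         hash_map[letra] = hash_map.get(letra, 0) + 1
--
--     for key, value in hash_map.items():
--         result = result + str(key) + str(value)
--
--     return result
-- ===== SOURCE B (Python) =====
-- def comprimir(cadena):
--     result = ""
--     rest = list(cadena)
--     while rest:
--         c = rest[0]
--         keep = [x for x in rest if x != c]
--         result += c + str(len(rest) - len(keep))
--         rest = keep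
--     return result
-- ===== Notes on version B (the rewrite author's own statement) =====
-- stated objective: alternative
-- what changed: Replaces A's one-pass frequency-dict build plus items loop by a successive-partition loop: repeatedly take the first remaining character, emit it with its multiplicity measured as the length drop when filtering it out, and continue on the filtered remainder.
import Mathlib
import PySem

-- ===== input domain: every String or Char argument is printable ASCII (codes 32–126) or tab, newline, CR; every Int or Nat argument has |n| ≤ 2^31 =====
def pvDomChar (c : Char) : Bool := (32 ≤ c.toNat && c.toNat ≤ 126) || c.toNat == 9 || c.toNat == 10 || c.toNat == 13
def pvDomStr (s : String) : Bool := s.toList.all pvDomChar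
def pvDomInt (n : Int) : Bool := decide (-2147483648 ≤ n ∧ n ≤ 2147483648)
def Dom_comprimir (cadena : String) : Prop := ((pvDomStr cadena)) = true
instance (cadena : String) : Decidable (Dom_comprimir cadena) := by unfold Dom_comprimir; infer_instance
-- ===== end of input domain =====

-- B replaces A's frequency-dict pass by successive partitioning: repeatedly take the first
-- remaining character, emit it with its multiplicity (length drop under filtering), and
-- recurse on the remainder with that character removed — no dict, same result.
-- ===== PORT A =====
def comprimir (cadena : String) : String :=
  let hash_map : PySem.Dict Char Int :=
    cadena.toList.foldl (fun d letra => d.insert letra (d.getD letra 0 + 1)) PySem.Dict.empty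
  hash_map.items.foldl (fun result kv => result ++ String.singleton kv.1 ++ PySem.Int.toStr kv.2) ""

-- ===== PORT B =====
def comprimirAltLoop : List Char → String → String
  | [], result => result
  | c :: t, result =>
    let keep := (c :: t).filter (fun x => x != c)
    comprimirAltLoop keep
      (result ++ String.singleton c ++
        PySem.Int.toStr (((c :: t).length : Int) - (keep.length : Int)))
  termination_by rest _ => rest.length
  decreasing_by
    simp only [List.filter, bne_self_eq_false]
    exact Nat.lt_succ_of_le (List.length_filter_le _ _)

def comprimir_alt (cadena : String) : String :=
  comprimirAltLoop cadena.toList ""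

-- ===== PRECONDITION & SPEC =====
def Spec_comprimir (cadena : String) (out : String) : Prop := out = comprimir_alt cadena
instance (cadena : String) (out : String) : Decidable (Spec_comprimir cadena out) := by unfold Spec_comprimir; infer_instance

-- ===== CLAIM (what is proved, stated in full; the proofs are below) =====
def Claim_equal_comprimir : Prop := ∀ (cadena : String), Dom_comprimir cadena → Spec_comprimir cadena (comprimir cadena)

-- ===== LEMMAS AND PROOFS =====

-- folding Set.add over elements all different from a skips past a leading a in the accumulator
lemma foldl_add_cons_of_ne (t : List Char) (a : Char) (s : List Char)
    (h : ∀ x ∈ t, x ≠ a) :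
    t.foldl PySem.Set.add (a :: s) = a :: t.foldl PySem.Set.add s := by
  induction t generalizing s with
  | nil => rfl
  | cons x xs ih =>
    have hxa : x ≠ a := h x (by simp)
    have : PySem.Set.add (a :: s) x = a :: PySem.Set.add s x := by
      simp only [PySem.Set.add, PySem.Set.contains]
      split <;> simp_all
    simp only [List.foldl_cons, this]
    exact ih _ (fun y hy => h y (by simp [hy]))

-- elements already in the accumulator can be filtered out of the fold
lemma foldl_add_filter (t : List Char) (s : PySem.Set Char) (c : Char) (hc : c ∈ s) :
    t.foldl PySem.Set.add s = (t.filter (fun x => x != c)).foldl PySem.Set.add s := by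
  induction t generalizing s with
  | nil => rfl
  | cons x xs ih =>
    by_cases hx : x = c
    · subst hx
      have hadd : PySem.Set.add s x = s := by
        simp [PySem.Set.add, PySem.Set.contains, hc]
      simp [hadd, ih s hc]
    · have hmem : c ∈ PySem.Set.add s x := by
        rw [PySem.Set.mem_add]; exact Or.inl hc
      have hxc : (x != c) = true := by simp [hx]
      simp [hxc, ih _ hmem]

-- first-occurrence dedup unfolds as: head, then dedup of the tail with the head removed
lemma ofList_cons_filter (c : Char) (t : List Char) :
    PySem.Set.ofList (c :: t) = c :: PySem.Set.ofList (t.filter (fun x => x != c)) := by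
  have h0 : PySem.Set.ofList (c :: t) = t.foldl PySem.Set.add [c] := by
    simp [PySem.Set.ofList, PySem.Set.add, PySem.Set.contains, PySem.Set.empty]
  rw [h0, foldl_add_filter t [c] c (by simp)]
  rw [foldl_add_cons_of_ne _ c []
    (fun x hx => by simpa using (List.of_mem_filter hx))]
  rfl

-- the emitted multiplicity (length drop under filtering) is the count of the head
lemma length_sub_filter_count (c : Char) (t : List Char) :
    (((c :: t).length : Int)) - (((c :: t).filter (fun x => x != c)).length : Int)
      = (((c :: t).count c : Int)) := by
  have h1 := List.length_eq_countP_add_countP (p := fun x => x != c) (l := c :: t)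
  have e : List.countP (fun a => decide ¬(a != c) = true) (c :: t)
      = List.countP (fun x => x == c) (c :: t) :=
    List.countP_congr (fun x _ => by by_cases hxc : x = c <;> simp [hxc])
  rw [e] at h1
  have h2 : ((c :: t).filter (fun x => x != c)).length
      = (c :: t).countP (fun x => x != c) := List.countP_eq_length_filter.symm
  have h3 : (c :: t).count c = (c :: t).countP (fun x => x == c) := List.count_eq_countP
  omega

-- main invariant: B's partition loop computes A's fold over the deduped list with original counts
lemma comprimirAltLoop_eq (n : Nat) :
    ∀ (l : List Char), l.length ≤ n → ∀ (acc : String),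
      comprimirAltLoop l acc
        = (PySem.Set.ofList l).foldl
            (fun r k => r ++ String.singleton k ++ PySem.Int.toStr ((l.count k : Int))) acc := by
  induction n with
  | zero =>
    intro l hl acc
    have : l = [] := List.eq_nil_of_length_eq_zero (Nat.le_zero.mp hl)
    subst this
    simp [comprimirAltLoop, PySem.Set.ofList, PySem.Set.empty]
  | succ m ih =>
    intro l hl acc
    match l with
    | [] => simp [comprimirAltLoop, PySem.Set.ofList, PySem.Set.empty]
    | c :: t =>
      rw [comprimirAltLoop]
      have hkeep : ((c :: t).filter (fun x => x != c)) = t.filter (fun x => x != c) := by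
        simp [List.filter]
      have hlen : (t.filter (fun x => x != c)).length ≤ m := by
        have := List.length_filter_le (fun x => x != c) t
        simp only [List.length_cons] at hl; omega
      rw [hkeep, ih _ hlen, ofList_cons_filter]
      simp only [List.foldl_cons]
      have hcnt := length_sub_filter_count c t
      rw [hkeep] at hcnt
      rw [hcnt]
      apply PySem.List.foldl_congr_mem
      intro r x hx
      have hx' : x ∈ t.filter (fun x => x != c) := by
        simpa [PySem.Set.mem_ofList] using hx
      have hxc : x ≠ c := by simpa using (List.of_mem_filter hx')
      congr 2
      rw [List.count_filter (by simp [bne, hxc])]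
      simp [List.count_cons]
      exact Ne.symm hxc

-- ===== VERDICT (by name: the statement is the Claim_ definition above) =====
theorem comprimir_spec : Claim_equal_comprimir := by
  intro cadena _
  unfold Spec_comprimir comprimir comprimir_alt
  simp only [PySem.Dict.foldl_insert_getD_add_one_eq_counter, PySem.Dict.items_counter,
    List.foldl_map]
  rw [comprimirAltLoop_eq cadena.toList.length cadena.toList le_rfl]
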